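-- pv_equiv track=rewrite | github.com/bmagyar11/password-hashing-thesis | main_pwdEncrypter.py | keyspace_from_charset_maxlen
-- ===== SOURCE A (Python) =====
-- def keyspace_from_charset_maxlen(charset, maxlen, minlen=1):
--     k = len(charset)
--     if k <= 0 or maxlen < minlen:
--         return 0
--     total = 0
--     for l in range(minlen, maxlen+1):
--         total += k**l
--     return total
-- ===== SOURCE B (Python) =====
-- def _geom_sum(k, n):
--     # sum_{i=0}^{n-1} k**i by doubling
--     if n == 0:
--         return 0
--     h = n // 2
--     s = _geom_sum(k, h)
--     s += k ** h * s
--     if n % 2: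
--         s += k ** (n - 1)
--     return s
--
-- def keyspace_from_charset_maxlen(charset, maxlen, minlen=1):
--     k = len(charset)
--     n = maxlen - minlen + 1
--     if k == 0 or n <= 0:
--         return 0
--     return k ** minlen * _geom_sum(k, n)
-- ===== Notes on version B (the rewrite author's own statement) =====
-- stated objective: alternative
-- what changed: Replaces the term-by-term summation loop with a recursive divide-and-conquer geometric-sum helper (doubling: S(2h)=S(h)+k^h*S(h)), scaled by k**minlen.
-- outside the precondition, e.g. on keyspace_from_charset_maxlen('ab', 1, -1): A returns 3.5, B returns 3.5; on keyspace_from_charset_maxlen('1z', 0, -8145): A returns 2.0, B raises OverflowError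
import Mathlib
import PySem

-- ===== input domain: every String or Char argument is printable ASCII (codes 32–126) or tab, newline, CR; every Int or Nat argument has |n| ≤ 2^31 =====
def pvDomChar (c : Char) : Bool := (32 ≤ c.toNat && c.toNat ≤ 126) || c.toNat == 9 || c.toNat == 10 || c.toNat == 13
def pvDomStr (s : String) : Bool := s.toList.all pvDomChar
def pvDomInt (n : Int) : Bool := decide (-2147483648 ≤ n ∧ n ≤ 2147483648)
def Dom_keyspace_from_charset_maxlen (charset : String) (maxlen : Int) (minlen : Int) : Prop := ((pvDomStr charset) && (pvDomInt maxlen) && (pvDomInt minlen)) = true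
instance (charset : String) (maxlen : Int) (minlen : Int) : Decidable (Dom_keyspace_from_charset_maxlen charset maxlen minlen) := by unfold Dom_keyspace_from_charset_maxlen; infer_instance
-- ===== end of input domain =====

-- B replaces A's per-length summation loop by a divide-and-conquer geometric-sum
-- helper (doubling), scaled by k^minlen.

-- ===== PORT A =====
def keyspace_from_charset_maxlen (charset : String) (maxlen : Int) (minlen : Int) : Int :=
  let k : Int := PySem.Str.len charset
  if k ≤ 0 ∨ maxlen < minlen then 0
  else
    -- for l in range(minlen, maxlen+1): total += k**l   (exponent is ≥ 0 on Pre_)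
    (PySem.List.pyRange minlen (maxlen + 1) 1).foldl (fun total l => total + k ^ l.toNat) 0

-- ===== PORT B =====
-- _geom_sum(k, n) = sum_{i=0}^{n-1} k**i by doubling
def pvGeomSum (k : Int) (n : Nat) : Int :=
  if h0 : n = 0 then 0
  else
    let h := n / 2
    let s := pvGeomSum k h
    let s := s + k ^ h * s
    if n % 2 = 1 then s + k ^ (n - 1) else s
decreasing_by exact Nat.div_lt_self (Nat.pos_of_ne_zero h0) (by omega)

def keyspace_from_charset_maxlen_alt (charset : String) (maxlen : Int) (minlen : Int) : Int :=
  let k : Int := PySem.Str.len charset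
  let n : Int := maxlen - minlen + 1
  if k = 0 ∨ n ≤ 0 then 0
  else k ^ minlen.toNat * pvGeomSum k n.toNat

-- ===== PRECONDITION & SPEC =====
-- Pre_ excludes inputs where the sum involves a negative exponent (nonempty charset,
-- minlen ≤ maxlen, minlen < 0): there Python's k**l is a float, so A returns a float, not an int.
def Pre_keyspace_from_charset_maxlen (charset : String) (maxlen : Int) (minlen : Int) : Prop :=
  0 ≤ minlen ∨ charset.length = 0 ∨ maxlen < minlen
instance (charset : String) (maxlen : Int) (minlen : Int) : Decidable (Pre_keyspace_from_charset_maxlen charset maxlen minlen) := by unfold Pre_keyspace_from_charset_maxlen; infer_instance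

def pvWitness_keyspace_from_charset_maxlen : String × Int × Int := ("abc", 5, 1)

def Spec_keyspace_from_charset_maxlen (charset : String) (maxlen : Int) (minlen : Int) (out : Int) : Prop := out = keyspace_from_charset_maxlen_alt charset maxlen minlen
instance (charset : String) (maxlen : Int) (minlen : Int) (out : Int) : Decidable (Spec_keyspace_from_charset_maxlen charset maxlen minlen out) := by unfold Spec_keyspace_from_charset_maxlen; infer_instance

-- ===== CLAIM (what is proved, stated in full; the proofs are below) =====
def Claim_equal_keyspace_from_charset_maxlen : Prop := ∀ (charset : String) (maxlen : Int) (minlen : Int), Dom_keyspace_from_charset_maxlen charset maxlen minlen → Pre_keyspace_from_charset_maxlen charset maxlen minlen → Spec_keyspace_from_charset_maxlen charset maxlen minlen (keyspace_from_charset_maxlen charset maxlen minlen)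

-- ===== LEMMAS AND PROOFS =====

-- splitting a range sum: Σ_{i<m+n} k^i = Σ_{i<m} k^i + k^m Σ_{i<n} k^i
theorem pv_sum_add (k : Int) (m : Nat) : ∀ n : Nat,
    (∑ i ∈ Finset.range (m + n), k ^ i)
      = (∑ i ∈ Finset.range m, k ^ i) + k ^ m * ∑ i ∈ Finset.range n, k ^ i
  | 0 => by simp
  | Nat.succ n => by
    rw [Nat.add_succ, Finset.sum_range_succ, Finset.sum_range_succ, pv_sum_add k m n,
      pow_add]
    ring

-- the doubling helper computes the geometric sum
theorem pvGeomSum_eq (k : Int) (n : Nat) :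
    pvGeomSum k n = ∑ i ∈ Finset.range n, k ^ i := by
  induction n using Nat.strong_induction_on with
  | _ n ih =>
    rw [pvGeomSum]
    by_cases h0 : n = 0
    · simp [h0]
    · simp only [h0]
      have ih2 := ih (n / 2) (Nat.div_lt_self (Nat.pos_of_ne_zero h0) (by omega))
      by_cases hp : n % 2 = 1
      · have hn : n = n / 2 + n / 2 + 1 := by omega
        simp only [hp, if_pos]
        rw [ih2, ← pv_sum_add k (n / 2) (n / 2),
          show n - 1 = n / 2 + n / 2 by omega]
        conv_rhs => rw [hn, Finset.sum_range_succ]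
        simp
      · have hn : n = n / 2 + n / 2 := by omega
        simp only [hp]
        rw [ih2, ← pv_sum_add k (n / 2) (n / 2)]
        conv_rhs => rw [hn]
        simp

-- A's loop equals k^a times the geometric sum, for 0 ≤ a
theorem pv_fold (k a : Int) (ha : 0 ≤ a) : ∀ n : Nat,
    (PySem.List.pyRange a (a + n) 1).foldl (fun total l => total + k ^ l.toNat) 0
      = k ^ a.toNat * ∑ i ∈ Finset.range n, k ^ i
  | 0 => by
    rw [PySem.List.pyRange_one_eq_nil (by omega)]
    simp
  | Nat.succ n => by
    have h2 : PySem.List.pyRange a ((a + n) + 1) 1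
        = PySem.List.pyRange a (a + n) 1 ++ [a + n] :=
      PySem.List.pyRange_one_succ_right (by omega)
    push_cast
    rw [show a + ((n : Int) + 1) = (a + n) + 1 by ring, h2, List.foldl_append]
    simp only [List.foldl_cons, List.foldl_nil]
    rw [pv_fold k a ha n, Finset.sum_range_succ,
      show (a + (n : Int)).toNat = a.toNat + n by omega, pow_add]
    ring

-- ===== VERDICT (by name: the statement is the Claim_ definition above) =====
theorem keyspace_from_charset_maxlen_spec : Claim_equal_keyspace_from_charset_maxlen := by
  intro charset maxlen minlen _ hpre
  simp only [Spec_keyspace_from_charset_maxlen, keyspace_from_charset_maxlen,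
    keyspace_from_charset_maxlen_alt]
  rw [PySem.Str.len_eq]
  have hlen : charset.length = charset.toList.length := by simp
  set k : Int := (charset.toList.length : Int) with hk
  have hk0 : 0 ≤ k := by positivity
  by_cases hA : k ≤ 0 ∨ maxlen < minlen
  · rw [if_pos hA, if_pos (by omega)]
  · push_neg at hA
    obtain ⟨hkpos, hml⟩ := hA
    rw [if_neg (by omega), if_neg (by omega)]
    have hmn : 0 ≤ minlen := by
      rcases hpre with hp | hp | hp
      · exact hp
      · exfalso; rw [hlen] at hp; omega
      · omega
    obtain ⟨n, hn⟩ : ∃ n : Nat, maxlen + 1 = minlen + n := ⟨(maxlen + 1 - minlen).toNat, by omega⟩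
    rw [hn, pv_fold k minlen hmn n, pvGeomSum_eq,
      show (maxlen - minlen + 1).toNat = n by omega]
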